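-- pv_equiv track=rewrite | github.com/dav-rob/Flow4AI | src/flow4ai/flowmanager_base.py | create_graph_name
-- ===== SOURCE A (Python) =====
-- from typing import Any, Collection, Dict, List, Union
--
-- def create_graph_name(graph: Dict[str, Dict[str, List[str]]]) -> str:
--     """
--     Create a default graph name based on head jobs in the graph.
--     Head jobs are jobs with no predecessors.
--
--     Args:
--         graph: The precedence graph structure
--
--     Returns:
--         str: A suitable graph name
--     """
--     # Find all jobs that are referenced as successors
--     all_jobs = set(graph.keys())
--     successor_jobs = set()
--     for job, details in graph.items():
--         successor_jobs.update(details['next'])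
--
--     # Head jobs are those not present in any 'next' list
--     head_jobs = all_jobs - successor_jobs
--
--     if head_jobs:
--         # Use the first head job name
--         return next(iter(sorted(head_jobs)))  # Sort for deterministic behavior
--     else:
--         # Fallback to the first job in the graph if no clear head job
--         return next(iter(sorted(graph.keys())))
-- ===== SOURCE B (Python) =====
-- def create_graph_name(graph):
--     best = None      # smallest head-job name seen so far
--     fallback = None  # smallest key seen so far
--     for name in graph:
--         if fallback is None or name < fallback:
--             fallback = name
--         if best is None or name < best:
--             # headness checked by scanning every 'next' list directly
--             if all(name not in details['next'] for details in graph.values()):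
--                 best = name
--     return best if best is not None else fallback
-- ===== Notes on version B (the rewrite author's own statement) =====
-- stated objective: alternative
-- what changed: A builds a successor set, takes a set difference and sorts it; B makes one pass over the keys keeping a running minimum (of head jobs and of all keys), deciding headness per candidate by a direct nested scan of the 'next' lists - no set, no set difference, no sort.
import Mathlib
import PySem

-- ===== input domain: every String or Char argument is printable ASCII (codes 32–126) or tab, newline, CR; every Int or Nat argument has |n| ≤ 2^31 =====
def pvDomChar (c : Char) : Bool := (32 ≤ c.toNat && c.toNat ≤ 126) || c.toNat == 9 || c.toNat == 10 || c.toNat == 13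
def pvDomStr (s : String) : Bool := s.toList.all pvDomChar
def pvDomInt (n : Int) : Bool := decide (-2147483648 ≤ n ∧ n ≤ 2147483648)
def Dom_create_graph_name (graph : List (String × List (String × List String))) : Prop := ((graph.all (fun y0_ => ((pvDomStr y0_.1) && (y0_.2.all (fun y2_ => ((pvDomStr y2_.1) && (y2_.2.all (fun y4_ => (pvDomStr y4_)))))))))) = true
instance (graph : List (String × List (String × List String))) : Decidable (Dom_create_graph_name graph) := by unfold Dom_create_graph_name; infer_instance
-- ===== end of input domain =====

-- B replaces A's successor-set / set-difference / sort pipeline by one pass over the keys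
-- with two running minima (smallest head job, smallest key), headness decided per candidate
-- by a direct scan of the 'next' lists; alternative decomposition, no speed claim.

-- ===== PORT A =====
-- details['next'] raises KeyError when 'next' is missing; the port totalizes it with
-- '.getD []' and Pre_ excludes exactly those inputs. next(iter(sorted(...))) raises
-- StopIteration on an empty graph; the port totalizes with '.headD ""' and Pre_
-- excludes the empty graph.
def create_graph_name (graph : List (String × List (String × List String))) : String :=
  let all_jobs : PySem.Set String := PySem.Set.ofList (graph.map (·.1))
  let successor_jobs : PySem.Set String :=
    graph.foldl
      (fun s jd => PySem.Set.update s (((PySem.Dict.mk jd.2).get? "next").getD []))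
      PySem.Set.empty
  let head_jobs : PySem.Set String := PySem.Set.diff all_jobs successor_jobs
  if !head_jobs.isEmpty then
    (PySem.List.sorted head_jobs (fun x => x) false).headD ""
  else
    (PySem.List.sorted (graph.map (·.1)) (fun x => x) false).headD ""

-- ===== PORT B =====
-- same totalizations as A's port: '.getD []' for the KeyError (note B's all(...) short-
-- circuits, so outside Pre_ B may return where A raises), and '.getD ""' for B's
-- 'return None' on the empty graph; both outside Pre_.

-- all(name not in details['next'] for details in graph.values())
def pvIsHead (graph : List (String × List (String × List String))) (name : String) : Bool :=
  graph.all (fun jd => !((((PySem.Dict.mk jd.2).get? "next").getD []).contains name))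

-- one loop iteration over state (best, fallback) at key 'name'
def pvStep (graph : List (String × List (String × List String)))
    (st : Option String × Option String) (name : String) : Option String × Option String :=
  let fallback := match st.2 with
    | none => some name
    | some f => if name < f then some name else some f
  let best := match st.1 with
    | none => if pvIsHead graph name then some name else none
    | some b => if name < b then (if pvIsHead graph name then some name else some b) else some b
  (best, fallback)

def create_graph_name_alt (graph : List (String × List (String × List String))) : String :=
  let r := graph.foldl (fun st jd => pvStep graph st jd.1) (none, none)
  match r.1 with
  | some b => b
  | none => r.2.getD ""

-- ===== PRECONDITION & SPEC =====
-- Pre_ excludes exactly the inputs where the Python A raises: the empty graph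
-- (StopIteration) and entries whose details dict lacks the key 'next' (KeyError).
def Pre_create_graph_name (graph : List (String × List (String × List String))) : Prop :=
  graph ≠ [] ∧ ∀ jd ∈ graph, "next" ∈ jd.2.map (·.1)
instance (graph : List (String × List (String × List String))) : Decidable (Pre_create_graph_name graph) := by unfold Pre_create_graph_name; infer_instance

def pvWitness_create_graph_name : (List (String × List (String × List String))) :=
  [("a", [("next", ["b"])]), ("b", [("next", [])])]

def Spec_create_graph_name (graph : List (String × List (String × List String))) (out : String) : Prop := out = create_graph_name_alt graph
instance (graph : List (String × List (String × List String))) (out : String) : Decidable (Spec_create_graph_name graph out) := by unfold Spec_create_graph_name; infer_instance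

-- ===== CLAIM (what is proved, stated in full; the proofs are below) =====
def Claim_equal_create_graph_name : Prop := ∀ (graph : List (String × List (String × List String))), Dom_create_graph_name graph → Pre_create_graph_name graph → Spec_create_graph_name graph (create_graph_name graph)

-- ===== LEMMAS AND PROOFS =====

-- "r is the minimum of the p-elements of s" (none ⟺ there are none)
def pvMinP (p : String → Bool) (r : Option String) (s : List String) : Prop :=
  match r with
  | none => ∀ y ∈ s, p y = false
  | some m => p m = true ∧ m ∈ s ∧ ∀ y ∈ s, p y = true → m ≤ y

-- "f is the minimum of s" (none ⟺ s empty)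
def pvMinA (f : Option String) (s : List String) : Prop :=
  match f with
  | none => s = []
  | some m => m ∈ s ∧ ∀ y ∈ s, m ≤ y

-- the loop invariant: B's fold keeps (min of heads so far, min of keys so far)
theorem pv_fold_invariant (g : List (String × List (String × List String)))
    (l : List String) : ∀ (s : List String) (b f : Option String),
    pvMinP (pvIsHead g) b s → pvMinA f s →
    pvMinP (pvIsHead g) (l.foldl (pvStep g) (b, f)).1 (s ++ l) ∧
    pvMinA (l.foldl (pvStep g) (b, f)).2 (s ++ l) := by
  induction l with
  | nil => intro s b f hb hf; simpa using ⟨hb, hf⟩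
  | cons n t ih =>
    intro s b f hb hf
    have hstep : pvMinP (pvIsHead g) (pvStep g (b, f) n).1 (s ++ [n]) ∧
        pvMinA (pvStep g (b, f) n).2 (s ++ [n]) := by
      refine ⟨?_, ?_⟩
      · -- best component
        dsimp only [pvStep]
        cases b with
        | none =>
          by_cases hp : pvIsHead g n = true
          · rw [if_pos hp]
            show pvIsHead g n = true ∧ n ∈ s ++ [n] ∧ ∀ y ∈ s ++ [n], pvIsHead g y = true → n ≤ y
            refine ⟨hp, by simp, ?_⟩
            intro y hy hpy
            rcases List.mem_append.mp hy with h | h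
            · exact absurd hpy (by simp [hb y h])
            · simp at h; exact le_of_eq h.symm
          · rw [if_neg hp]
            show ∀ y ∈ s ++ [n], pvIsHead g y = false
            intro y hy
            rcases List.mem_append.mp hy with h | h
            · exact hb y h
            · simp at h; subst h; simpa using hp
        | some m =>
          dsimp only
          obtain ⟨hpm, hmem, hmin⟩ := hb
          by_cases hlt : n < m
          · rw [if_pos hlt]
            by_cases hp : pvIsHead g n = true
            · rw [if_pos hp]
              show pvIsHead g n = true ∧ n ∈ s ++ [n] ∧ ∀ y ∈ s ++ [n], pvIsHead g y = true → n ≤ y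
              refine ⟨hp, by simp, ?_⟩
              intro y hy hpy
              rcases List.mem_append.mp hy with h | h
              · exact le_trans (le_of_lt hlt) (hmin y h hpy)
              · simp at h; exact le_of_eq h.symm
            · rw [if_neg hp]
              show pvIsHead g m = true ∧ m ∈ s ++ [n] ∧ ∀ y ∈ s ++ [n], pvIsHead g y = true → m ≤ y
              refine ⟨hpm, List.mem_append_left _ hmem, ?_⟩
              intro y hy hpy
              rcases List.mem_append.mp hy with h | h
              · exact hmin y h hpy
              · simp at h; subst h; exact absurd hpy hp
          · rw [if_neg hlt]
            show pvIsHead g m = true ∧ m ∈ s ++ [n] ∧ ∀ y ∈ s ++ [n], pvIsHead g y = true → m ≤ y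
            refine ⟨hpm, List.mem_append_left _ hmem, ?_⟩
            intro y hy hpy
            rcases List.mem_append.mp hy with h | h
            · exact hmin y h hpy
            · simp at h; subst h; exact le_of_not_gt hlt
      · -- fallback component
        dsimp only [pvStep]
        cases f with
        | none =>
          have hs : s = [] := hf
          subst hs; simp [pvMinA]
        | some m =>
          dsimp only
          obtain ⟨hmem, hmin⟩ := hf
          by_cases hlt : n < m
          · rw [if_pos hlt]
            show n ∈ s ++ [n] ∧ ∀ y ∈ s ++ [n], n ≤ y
            refine ⟨by simp, ?_⟩
            intro y hy
            rcases List.mem_append.mp hy with h | h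
            · exact le_trans (le_of_lt hlt) (hmin y h)
            · simp at h; exact le_of_eq h.symm
          · rw [if_neg hlt]
            show m ∈ s ++ [n] ∧ ∀ y ∈ s ++ [n], m ≤ y
            refine ⟨List.mem_append_left _ hmem, ?_⟩
            intro y hy
            rcases List.mem_append.mp hy with h | h
            · exact hmin y h
            · simp at h; subst h; exact le_of_not_gt hlt
    have := ih (s ++ [n]) _ _ hstep.1 hstep.2
    simpa [List.foldl_cons, List.append_assoc] using this

-- x is in A's successor set iff some 'next' list contains it
theorem pv_mem_succ (g : List (String × List (String × List String))) (x : String) :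
    (x ∈ g.foldl
      (fun s jd => PySem.Set.update s (((PySem.Dict.mk jd.2).get? "next").getD []))
      PySem.Set.empty)
    ↔ ∃ jd ∈ g, x ∈ (((PySem.Dict.mk jd.2).get? "next").getD []) := by
  induction g using List.reverseRecOn with
  | nil => simp [PySem.Set.empty]
  | append_singleton t jd ih =>
    rw [List.foldl_append]
    simp only [List.foldl_cons, List.foldl_nil]
    rw [PySem.Set.mem_update, ih]
    constructor
    · rintro (⟨jd', h1, h2⟩ | h)
      · exact ⟨jd', List.mem_append_left _ h1, h2⟩
      · exact ⟨jd, List.mem_append_right _ (by simp), h⟩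
    · rintro ⟨jd', h1, h2⟩
      rcases List.mem_append.mp h1 with h | h
      · exact Or.inl ⟨jd', h, h2⟩
      · simp at h; subst h; exact Or.inr h2

-- headness as B computes it = absence from A's successor set
theorem pv_isHead_iff (g : List (String × List (String × List String))) (x : String) :
    pvIsHead g x = true ↔
    x ∉ g.foldl
      (fun s jd => PySem.Set.update s (((PySem.Dict.mk jd.2).get? "next").getD []))
      PySem.Set.empty := by
  rw [pv_mem_succ]
  simp [pvIsHead, List.all_eq_true]

-- ===== VERDICT (by name: the statement is the Claim_ definition above) =====
theorem create_graph_name_spec : Claim_equal_create_graph_name := by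
  intro graph _ _
  unfold Spec_create_graph_name create_graph_name create_graph_name_alt
  dsimp only
  set keys := graph.map (·.1) with hkeys
  set S := graph.foldl
      (fun s jd => PySem.Set.update s (((PySem.Dict.mk jd.2).get? "next").getD []))
      PySem.Set.empty with hS
  set H : PySem.Set String := PySem.Set.diff (PySem.Set.ofList keys) S with hH
  have hHx : ∀ x, x ∈ H ↔ x ∈ keys ∧ pvIsHead graph x = true := by
    intro x
    rw [hH, PySem.Set.mem_diff, PySem.Set.mem_ofList, pv_isHead_iff graph x]
  have hfold : graph.foldl (fun st jd => pvStep graph st jd.1) (none, none)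
      = keys.foldl (pvStep graph) (none, none) := by
    rw [hkeys, List.foldl_map]
  rw [hfold]
  obtain ⟨hbest, hfall⟩ := pv_fold_invariant graph keys [] none none
    (by intro y hy; simp at hy) rfl
  simp only [List.nil_append] at hbest hfall
  by_cases hHe : H = []
  · -- no head job: A takes the sorted-keys fallback, B's best is none
    have hie : H.isEmpty = true := by simp [hHe]
    rw [hie]
    simp only [Bool.not_true, Bool.false_eq_true, if_false]
    cases hb : (keys.foldl (pvStep graph) (none, none)).1 with
    | some m =>
      rw [hb] at hbest
      obtain ⟨hpm, hmem, _⟩ := hbest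
      have : m ∈ H := (hHx m).mpr ⟨hmem, hpm⟩
      rw [hHe] at this; exact absurd this (List.not_mem_nil)
    | none =>
      cases hf : (keys.foldl (pvStep graph) (none, none)).2 with
      | none =>
        rw [hf] at hfall
        have hk : keys = [] := hfall
        rw [hk]
        rfl
      | some m =>
        rw [hf] at hfall
        obtain ⟨hmem, hmin⟩ := hfall
        cases hsk : PySem.List.sorted keys (fun x => x) false with
        | nil =>
          have : keys = [] := (PySem.List.sorted_eq_nil_iff keys (fun x => x) false).mp hsk
          rw [this] at hmem; exact absurd hmem (List.not_mem_nil)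
        | cons a t =>
          have ha_mem : a ∈ keys := by
            have := (PySem.List.sorted_perm keys (fun x => x) false).mem_iff (a := a)
            rw [hsk] at this
            exact this.mp (by simp)
          have h1 : a ≤ m := PySem.List.key_head_sorted_le _ _ hsk m hmem
          have h2 : m ≤ a := hmin a ha_mem
          simp [le_antisymm h1 h2]
  · -- some head job exists: A takes the head of sorted H, B's best is some
    have hie : H.isEmpty = false := by simp [hHe]
    rw [hie]
    simp only [Bool.not_false, if_true]
    cases hsk : PySem.List.sorted H (fun x => x) false with
    | nil => exact absurd ((PySem.List.sorted_eq_nil_iff H (fun x => x) false).mp hsk) hHe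
    | cons a t =>
      have ha_mem : a ∈ H := by
        have := (PySem.List.sorted_perm H (fun x => x) false).mem_iff (a := a)
        rw [hsk] at this
        exact this.mp (by simp)
      obtain ⟨haK, hpa⟩ := (hHx a).mp ha_mem
      cases hb : (keys.foldl (pvStep graph) (none, none)).1 with
      | none =>
        rw [hb] at hbest
        exact absurd hpa (by simp [hbest a haK])
      | some m =>
        rw [hb] at hbest
        obtain ⟨hpm, hmem, hmin⟩ := hbest
        have hmH : m ∈ H := (hHx m).mpr ⟨hmem, hpm⟩
        have h1 : a ≤ m := PySem.List.key_head_sorted_le _ _ hsk m hmH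
        have h2 : m ≤ a := hmin a haK hpa
        simp [le_antisymm h1 h2]
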